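-- pv_equiv track=rewrite | github.com/Takato0884/proj-rank-general | code/ranknet_seq/evaluation.py | create_id_dict_per_person
-- ===== SOURCE A (Python) =====
-- def create_id_dict_per_person(id_list):
--     ranklist_dict = {}
--     u_id_set = set()
--     for id in id_list:
--         u_id_set.add(id[:3])
--     u_id_list = sorted(list(u_id_set))
--     for u in u_id_list:
--         ranklist_dict[u] = {"ids": []}
--         for id in id_list:
--             if u == id[:3]:
--                 ranklist_dict[u]["ids"].append(id)
--
--     return ranklist_dict
-- ===== SOURCE B (Python) =====
-- def create_id_dict_per_person(id_list):
--     buckets = {}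
--     for id in id_list:
--         buckets.setdefault(id[:3], []).append(id)
--     return {u: {"ids": buckets[u]} for u in sorted(buckets)}
-- ===== Notes on version B (the rewrite author's own statement) =====
-- stated objective: faster
-- what changed: Single pass bucketing ids into a dict keyed by 3-char prefix, then one sorted-key comprehension, instead of rescanning the whole id_list once per distinct prefix.
import Mathlib
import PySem

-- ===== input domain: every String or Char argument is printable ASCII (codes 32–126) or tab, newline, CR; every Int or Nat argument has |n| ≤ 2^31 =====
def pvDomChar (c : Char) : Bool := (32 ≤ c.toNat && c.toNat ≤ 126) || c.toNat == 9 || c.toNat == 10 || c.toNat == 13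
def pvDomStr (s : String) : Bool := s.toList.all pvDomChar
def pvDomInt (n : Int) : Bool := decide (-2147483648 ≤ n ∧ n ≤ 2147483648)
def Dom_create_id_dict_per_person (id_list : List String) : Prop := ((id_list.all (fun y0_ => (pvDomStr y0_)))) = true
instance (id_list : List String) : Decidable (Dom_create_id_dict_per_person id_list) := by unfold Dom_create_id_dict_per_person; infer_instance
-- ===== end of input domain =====

-- B replaces A's rescan of id_list per distinct prefix by a single bucketing pass plus a sort of the keys (faster).

-- ===== PORT A =====
def create_id_dict_per_person (id_list : List String) : List (String × List (String × List String)) :=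
  let u_id_set : PySem.Set String :=
    id_list.foldl (fun s id => PySem.Set.add s (PySem.Str.slice id none (some 3))) PySem.Set.empty
  let u_id_list := PySem.List.sorted u_id_set (fun x => x)
  (u_id_list.foldl (fun d u =>
      PySem.Dict.insert d u
        (PySem.Dict.insert PySem.Dict.empty "ids"
          (id_list.foldl (fun ids id =>
            if u == PySem.Str.slice id none (some 3) then ids ++ [id] else ids) [])).items)
    PySem.Dict.empty).items

-- ===== PORT B =====
def create_id_dict_per_person_alt (id_list : List String) : List (String × List (String × List String)) :=
  let buckets : PySem.Dict String (List String) :=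
    id_list.foldl (fun d id =>
      PySem.Dict.modify d (PySem.Str.slice id none (some 3)) [] (fun l => l ++ [id]))
      PySem.Dict.empty
  (PySem.List.sorted buckets.keys (fun x => x)).map
    (fun u => (u, [("ids", buckets.getD u [])]))

-- ===== PRECONDITION & SPEC =====
def Spec_create_id_dict_per_person (id_list : List String) (out : List (String × List (String × List String))) : Prop := out = create_id_dict_per_person_alt id_list
instance (id_list : List String) (out : List (String × List (String × List String))) : Decidable (Spec_create_id_dict_per_person id_list out) := by unfold Spec_create_id_dict_per_person; infer_instance

-- ===== CLAIM (what is proved, stated in full; the proofs are below) =====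
def Claim_equal_create_id_dict_per_person : Prop := ∀ (id_list : List String), Dom_create_id_dict_per_person id_list → Spec_create_id_dict_per_person id_list (create_id_dict_per_person id_list)

-- ===== LEMMAS AND PROOFS =====

-- the keys of B's bucket dict are exactly A's first-occurrence prefix set
theorem keys_bucket_fold (l : List String) (d : PySem.Dict String (List String)) :
    (l.foldl (fun d id =>
        PySem.Dict.modify d (PySem.Str.slice id none (some 3)) [] (fun l => l ++ [id])) d).keys
      = l.foldl (fun s id => PySem.Set.add s (PySem.Str.slice id none (some 3))) d.keys := by
  induction l generalizing d with
  | nil => rfl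
  | cons x xs ih =>
      simp only [List.foldl_cons, ih]
      congr 1
      rw [PySem.Dict.keys_modify]
      by_cases h : d.contains (PySem.Str.slice x none (some 3)) = true
      · have hm : (PySem.Str.slice x none (some 3)) ∈ d.keys :=
          (PySem.Dict.contains_iff_mem_keys d _).mp h
        simp [PySem.Dict.keys_insert_of_contains _ _ h, PySem.Set.add,
          hm]
      · have hm : ¬ (PySem.Str.slice x none (some 3)) ∈ d.keys :=
          fun hmem => h ((PySem.Dict.contains_iff_mem_keys d _).mpr hmem)
        simp [PySem.Dict.keys_insert_of_not_contains _ _ (by simpa using h), PySem.Set.add,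
          hm]

-- folding insert over fresh, nodup keys yields the item list directly
theorem items_insert_fold (f : String → List (String × List String)) (us : List String)
    (d : PySem.Dict String (List (String × List String)))
    (hfresh : ∀ u ∈ us, d.contains u = false) (hnd : us.Nodup) :
    (us.foldl (fun d u => PySem.Dict.insert d u (f u)) d).items
      = d.items ++ us.map (fun u => (u, f u)) := by
  induction us generalizing d with
  | nil => simp
  | cons x xs ih =>
      simp only [List.foldl_cons, List.map_cons]
      rw [ih]
      · rw [PySem.Dict.items_insert_of_not_contains _ _ (hfresh x (by simp))]
        simp
      · intro u hu
        rw [PySem.Dict.contains_insert]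
        have hne : u ≠ x := fun h => (List.nodup_cons.mp hnd).1 (h ▸ hu)
        simp [hne, hfresh u (List.mem_cons_of_mem _ hu)]
      · exact (List.nodup_cons.mp hnd).2

-- the per-prefix bucket agrees with A's inner rescan
theorem bucket_eq_aux (u : String) (l : List String) (d : PySem.Dict String (List String))
    (acc : List String) (h : d.getD u [] = acc) :
    (l.foldl (fun d id =>
        PySem.Dict.modify d (PySem.Str.slice id none (some 3)) [] (fun l => l ++ [id])) d).getD u []
      = l.foldl (fun ids id =>
          if u == PySem.Str.slice id none (some 3) then ids ++ [id] else ids) acc := by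
  induction l generalizing d acc with
  | nil => simpa using h
  | cons x xs ih =>
      simp only [List.foldl_cons]
      apply ih
      rw [PySem.Dict.getD_modify]
      by_cases hux : u = PySem.Str.slice x none (some 3)
      · subst hux; simp [h]
      · simp [hux, h]

theorem bucket_eq (id_list : List String) (u : String) :
    (id_list.foldl (fun d id =>
        PySem.Dict.modify d (PySem.Str.slice id none (some 3)) [] (fun l => l ++ [id]))
        PySem.Dict.empty).getD u []
      = id_list.foldl (fun ids id =>
          if u == PySem.Str.slice id none (some 3) then ids ++ [id] else ids) [] :=
  bucket_eq_aux u id_list PySem.Dict.empty [] (PySem.Dict.getD_empty _ _)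

-- ===== VERDICT (by name: the statement is the Claim_ definition above) =====
theorem create_id_dict_per_person_spec : Claim_equal_create_id_dict_per_person := by
  intro id_list _
  show _ = _
  simp only [create_id_dict_per_person, create_id_dict_per_person_alt]
  rw [keys_bucket_fold, PySem.Dict.keys_empty]
  simp only [PySem.Set.empty]
  have hset : id_list.foldl (fun s id => PySem.Set.add s (PySem.Str.slice id none (some 3)))
      ([] : PySem.Set String)
      = PySem.Set.ofList (id_list.map (fun id => PySem.Str.slice id none (some 3))) := by
    simp [PySem.Set.ofList, PySem.Set.empty, List.foldl_map]
  rw [hset]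
  have hlt := PySem.List.sorted_ofList_pairwise_lt
    (id_list.map (fun id => PySem.Str.slice id none (some 3)))
  have hnd : (PySem.List.sorted
      (PySem.Set.ofList (id_list.map (fun id => PySem.Str.slice id none (some 3))))
      (fun x => x)).Nodup := hlt.imp ne_of_lt
  rw [items_insert_fold _ _ _ (fun _ _ => PySem.Dict.contains_empty _) hnd]
  rw [show (PySem.Dict.empty : PySem.Dict String (List (String × List String))).items = []
        from rfl, List.nil_append]
  apply List.map_congr_left
  intro u _
  simp only [bucket_eq]
  rfl
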